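-- pv_equiv track=rewrite | github.com/GrAnD14/- | dxxz.py | generate_error_correction_table
-- ===== SOURCE A (Python) =====
-- def generate_error_correction_table(syndromes):
--     """Генерация таблицы кратность - корректирующая способность."""
--     table = {}
--     for syndrome, errors in syndromes.items():
--         error_multiplicity = errors[0].count(1)
--         if error_multiplicity not in table:
--             table[error_multiplicity] = {'syndromes': [], 'correction_capabilities': []}
--
--         table[error_multiplicity]['syndromes'].append(syndrome)
--         table[error_multiplicity]['correction_capabilities'].append(len(errors))
--
--     return table
-- ===== SOURCE B (Python) =====
-- def generate_error_correction_table(syndromes):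
--     """Compute each entry's multiplicity key once, then build the table per
--     distinct key (first-occurrence order) with filtering passes."""
--     keyed = [(errors[0].count(1), syndrome, len(errors))
--              for syndrome, errors in syndromes.items()]
--     return {k: {'syndromes': [s for kk, s, _ in keyed if kk == k],
--                 'correction_capabilities': [c for kk, _, c in keyed if kk == k]}
--             for k in dict.fromkeys(kk for kk, _, _ in keyed)}
-- ===== Notes on version B (the rewrite author's own statement) =====
-- stated objective: alternative
-- what changed: A accumulates the table in one pass, creating and mutating per-key dict entries as it goes; B first computes each entry's multiplicity key once into a list of triples, then builds the table per distinct key (first-occurrence order) with filtering passes.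
-- outside the precondition, e.g. on generate_error_correction_table({1: []}): A raises IndexError, B raises IndexError
import Mathlib
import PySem

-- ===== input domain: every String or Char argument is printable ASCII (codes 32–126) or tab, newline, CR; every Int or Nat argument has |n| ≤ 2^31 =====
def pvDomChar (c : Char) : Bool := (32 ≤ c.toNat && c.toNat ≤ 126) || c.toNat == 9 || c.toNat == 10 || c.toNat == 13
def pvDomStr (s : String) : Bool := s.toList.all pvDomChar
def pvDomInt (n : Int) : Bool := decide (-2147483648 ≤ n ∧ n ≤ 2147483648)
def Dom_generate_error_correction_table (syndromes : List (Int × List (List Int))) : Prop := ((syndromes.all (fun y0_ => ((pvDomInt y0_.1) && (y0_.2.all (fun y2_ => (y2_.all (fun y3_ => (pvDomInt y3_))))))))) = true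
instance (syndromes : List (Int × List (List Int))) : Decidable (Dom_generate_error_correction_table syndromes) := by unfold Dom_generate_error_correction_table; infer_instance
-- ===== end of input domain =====

-- B replaces A's incremental dict-of-lists accumulation by computing each entry's
-- multiplicity key once and building the table per distinct key with filtering passes
-- (objective: alternative decomposition, same behaviour).

-- ===== PORT A =====
-- the fresh inner dict {'syndromes': [], 'correction_capabilities': []}
def pvInit : PySem.Dict String (List Int) :=
  PySem.Dict.ofList [("syndromes", []), ("correction_capabilities", [])]

-- one iteration of A's loop body
def pvStepA (table : PySem.Dict Int (PySem.Dict String (List Int)))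
    (p : Int × List (List Int)) : PySem.Dict Int (PySem.Dict String (List Int)) :=
  let m : Int := ((PySem.List.pyGetD p.2 0 ([] : List Int)).count 1 : Nat)
  let t := if table.contains m then table else table.insert m pvInit
  let t := t.modify m pvInit (fun d => d.modify "syndromes" [] (· ++ [p.1]))
  t.modify m pvInit (fun d => d.modify "correction_capabilities" [] (· ++ [(p.2.length : Int)]))

def generate_error_correction_table (syndromes : List (Int × List (List Int))) :
    List (Int × List (String × List Int)) :=
  ((syndromes.foldl pvStepA PySem.Dict.empty).items).map (fun q => (q.1, q.2.items))

-- ===== PORT B =====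
def generate_error_correction_table_alt (syndromes : List (Int × List (List Int))) :
    List (Int × List (String × List Int)) :=
  let keyed : List (Int × Int × Int) :=
    syndromes.map (fun p =>
      (((PySem.List.pyGetD p.2 0 ([] : List Int)).count 1 : Nat), p.1, (p.2.length : Int)))
  (PySem.List.dedup (keyed.map (fun t => t.1))).map (fun k =>
    (k, [("syndromes", (keyed.filter (fun t => t.1 == k)).map (fun t => t.2.1)),
         ("correction_capabilities", (keyed.filter (fun t => t.1 == k)).map (fun t => t.2.2))]))

-- ===== PRECONDITION & SPEC =====
-- Pre_ excludes inputs where some value list is empty: there Python A (and B alike)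
-- raises IndexError on errors[0].
def Pre_generate_error_correction_table (syndromes : List (Int × List (List Int))) : Prop :=
  ∀ p ∈ syndromes, p.2 ≠ []
instance (syndromes : List (Int × List (List Int))) : Decidable (Pre_generate_error_correction_table syndromes) := by unfold Pre_generate_error_correction_table; infer_instance
def pvWitness_generate_error_correction_table : (List (Int × List (List Int))) := [(3, [[1, 0, 1]]), (5, [[0, 1, 0], [1, 1, 1]])]

def Spec_generate_error_correction_table (syndromes : List (Int × List (List Int))) (out : List (Int × List (String × List Int))) : Prop := out = generate_error_correction_table_alt syndromes
instance (syndromes : List (Int × List (List Int))) (out : List (Int × List (String × List Int))) : Decidable (Spec_generate_error_correction_table syndromes out) := by unfold Spec_generate_error_correction_table; infer_instance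

-- ===== CLAIM (what is proved, stated in full; the proofs are below) =====
def Claim_equal_generate_error_correction_table : Prop := ∀ (syndromes : List (Int × List (List Int))), Dom_generate_error_correction_table syndromes → Pre_generate_error_correction_table syndromes → Spec_generate_error_correction_table syndromes (generate_error_correction_table syndromes)

-- ===== LEMMAS AND PROOFS =====

-- the key/value triple A computes from one item
def pvTriple (p : Int × List (List Int)) : Int × Int × Int :=
  (((PySem.List.pyGetD p.2 0 ([] : List Int)).count 1 : Nat), p.1, (p.2.length : Int))

-- A's loop body on a precomputed triple
def pvStep (d : PySem.Dict Int (PySem.Dict String (List Int)))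
    (x : Int × Int × Int) : PySem.Dict Int (PySem.Dict String (List Int)) :=
  let t := if d.contains x.1 then d else d.insert x.1 pvInit
  let t := t.modify x.1 pvInit (fun v => v.modify "syndromes" [] (· ++ [x.2.1]))
  t.modify x.1 pvInit (fun v => v.modify "correction_capabilities" [] (· ++ [x.2.2]))

def pvInner (xs ys : List Int) : PySem.Dict String (List Int) :=
  PySem.Dict.mk [("syndromes", xs), ("correction_capabilities", ys)]

lemma pvInit_eq : pvInit = pvInner [] [] := by decide

lemma pvInner_getS (xs ys : List Int) : (pvInner xs ys).getD "syndromes" [] = xs := by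
  simp [pvInner, PySem.Dict.getD, PySem.Dict.get?]

lemma pvInner_getC (xs ys : List Int) :
    (pvInner xs ys).getD "correction_capabilities" [] = ys := by
  simp [pvInner, PySem.Dict.getD, PySem.Dict.get?]

lemma pvInner_modS (xs ys : List Int) (s : Int) :
    (pvInner xs ys).modify "syndromes" [] (· ++ [s]) = pvInner (xs ++ [s]) ys := by
  simp [pvInner, PySem.Dict.modify, PySem.Dict.insert, PySem.Dict.getD, PySem.Dict.get?,
    PySem.Dict.contains]

lemma pvInner_modC (xs ys : List Int) (c : Int) :
    (pvInner xs ys).modify "correction_capabilities" [] (· ++ [c]) = pvInner xs (ys ++ [c]) := by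
  simp [pvInner, PySem.Dict.modify, PySem.Dict.insert, PySem.Dict.getD, PySem.Dict.get?,
    PySem.Dict.contains]

-- the two accumulated lists of a key
def pvS (d : PySem.Dict Int (PySem.Dict String (List Int))) (k : Int) : List Int :=
  (d.getD k pvInit).getD "syndromes" []
def pvC (d : PySem.Dict Int (PySem.Dict String (List Int))) (k : Int) : List Int :=
  (d.getD k pvInit).getD "correction_capabilities" []

def pvGood (d : PySem.Dict Int (PySem.Dict String (List Int))) : Prop :=
  ∀ k, d.getD k pvInit = pvInner (pvS d k) (pvC d k)

lemma pvGood_empty : pvGood PySem.Dict.empty := by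
  intro k
  simp [pvS, pvC, PySem.Dict.getD_empty, pvInit_eq, pvInner_getS, pvInner_getC]

lemma pvStep_getD (d : PySem.Dict Int (PySem.Dict String (List Int))) (x : Int × Int × Int)
    (hd : pvGood d) (k' : Int) :
    (pvStep d x).getD k' pvInit =
      if k' = x.1 then pvInner (pvS d x.1 ++ [x.2.1]) (pvC d x.1 ++ [x.2.2])
      else d.getD k' pvInit := by
  unfold pvStep
  by_cases hc : d.contains x.1
  · rw [if_pos hc]
    by_cases h : k' = x.1
    · subst h
      simp only [PySem.Dict.getD_modify, if_true]
      rw [hd x.1, pvInner_modS, pvInner_modC]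
    · simp [h, PySem.Dict.getD_modify]
  · have hcb : d.contains x.1 = false := by simpa using hc
    have hd0 : d.getD x.1 pvInit = pvInit := PySem.Dict.getD_of_not_contains d pvInit hcb
    have hS0 : pvS d x.1 = [] := by unfold pvS; rw [hd0, pvInit_eq, pvInner_getS]
    have hC0 : pvC d x.1 = [] := by unfold pvC; rw [hd0, pvInit_eq, pvInner_getC]
    rw [if_neg (by simp [hcb])]
    by_cases h : k' = x.1
    · subst h
      simp only [PySem.Dict.getD_modify, PySem.Dict.getD_insert, if_true]
      rw [pvInit_eq, pvInner_modS, pvInner_modC, hS0, hC0]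
    · simp [h, PySem.Dict.getD_modify, PySem.Dict.getD_insert]

lemma pvS_step (d : PySem.Dict Int (PySem.Dict String (List Int))) (x : Int × Int × Int)
    (hd : pvGood d) (k : Int) :
    pvS (pvStep d x) k = if k = x.1 then pvS d x.1 ++ [x.2.1] else pvS d k := by
  unfold pvS
  rw [pvStep_getD d x hd k]
  by_cases h : k = x.1 <;> simp [h, pvInner_getS, pvS]

lemma pvC_step (d : PySem.Dict Int (PySem.Dict String (List Int))) (x : Int × Int × Int)
    (hd : pvGood d) (k : Int) :
    pvC (pvStep d x) k = if k = x.1 then pvC d x.1 ++ [x.2.2] else pvC d k := by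
  unfold pvC
  rw [pvStep_getD d x hd k]
  by_cases h : k = x.1 <;> simp [h, pvInner_getC, pvC]

lemma pvStep_good (d : PySem.Dict Int (PySem.Dict String (List Int))) (x : Int × Int × Int)
    (hd : pvGood d) : pvGood (pvStep d x) := by
  intro k
  rw [pvStep_getD d x hd k, pvS_step d x hd k, pvC_step d x hd k]
  by_cases h : k = x.1 <;> simp [h, hd k]

lemma pvFold_getD (l : List (Int × Int × Int)) (d : PySem.Dict Int (PySem.Dict String (List Int)))
    (hd : pvGood d) (k : Int) :
    (l.foldl pvStep d).getD k pvInit =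
      pvInner (pvS d k ++ (l.filter (fun t => t.1 == k)).map (fun t => t.2.1))
              (pvC d k ++ (l.filter (fun t => t.1 == k)).map (fun t => t.2.2)) := by
  induction l generalizing d with
  | nil => simpa using hd k
  | cons x t ih =>
      have hg := pvStep_good d x hd
      rw [List.foldl_cons, ih _ hg]
      rw [pvS_step d x hd k, pvC_step d x hd k]
      by_cases h : k = x.1
      · subst h
        simp
      · have hb : (x.1 == k) = false := beq_eq_false_iff_ne.mpr (Ne.symm h)
        simp [h, hb]

lemma pvStep_keys (d : PySem.Dict Int (PySem.Dict String (List Int))) (x : Int × Int × Int) :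
    (pvStep d x).keys = PySem.Set.add d.keys x.1 := by
  unfold pvStep
  by_cases hc : d.contains x.1
  · have h1 : (d.modify x.1 pvInit (fun v => v.modify "syndromes" [] (· ++ [x.2.1]))).keys
        = d.keys := by
      rw [PySem.Dict.keys_modify, PySem.Dict.keys_insert_of_contains _ _ hc]
    have hc1 : (d.modify x.1 pvInit
        (fun v => v.modify "syndromes" [] (· ++ [x.2.1]))).contains x.1 = true := by
      simp [PySem.Dict.contains_modify]
    rw [if_pos hc, PySem.Dict.keys_modify, PySem.Dict.keys_insert_of_contains _ _ hc1, h1]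
    have hm : x.1 ∈ d.keys := (PySem.Dict.contains_iff_mem_keys d x.1).mp hc
    simp [PySem.Set.add, PySem.Set.contains, hm]
  · have hcb : d.contains x.1 = false := by simpa using hc
    have h1 : ((d.insert x.1 pvInit).modify x.1 pvInit
        (fun v => v.modify "syndromes" [] (· ++ [x.2.1]))).keys
        = d.keys ++ [x.1] := by
      rw [PySem.Dict.keys_modify,
        PySem.Dict.keys_insert_of_contains _ _ (PySem.Dict.contains_insert_self d x.1 pvInit),
        PySem.Dict.keys_insert_of_not_contains _ _ hcb]
    have hc1 : ((d.insert x.1 pvInit).modify x.1 pvInit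
        (fun v => v.modify "syndromes" [] (· ++ [x.2.1]))).contains x.1 = true := by
      simp [PySem.Dict.contains_modify]
    rw [if_neg (by simp [hcb]), PySem.Dict.keys_modify,
      PySem.Dict.keys_insert_of_contains _ _ hc1, h1]
    have hm : x.1 ∉ d.keys := fun h =>
      by simp [(PySem.Dict.contains_iff_mem_keys d x.1).mpr h] at hcb
    simp [PySem.Set.add, PySem.Set.contains, hm]

lemma pvFold_keys (l : List (Int × Int × Int)) (d : PySem.Dict Int (PySem.Dict String (List Int))) :
    (l.foldl pvStep d).keys = PySem.Set.update d.keys (l.map (fun t => t.1)) := by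
  induction l generalizing d with
  | nil => simp [PySem.Set.update]
  | cons x t ih =>
      rw [List.foldl_cons, ih, pvStep_keys]
      simp [PySem.Set.update]

-- ===== VERDICT (by name: the statement is the Claim_ definition above) =====
theorem generate_error_correction_table_spec : Claim_equal_generate_error_correction_table := by
  intro syndromes _ _
  unfold Spec_generate_error_correction_table
  unfold generate_error_correction_table generate_error_correction_table_alt
  have hfold : syndromes.foldl pvStepA PySem.Dict.empty
      = (syndromes.map pvTriple).foldl pvStep PySem.Dict.empty := by
    rw [List.foldl_map]
    rfl
  set l := syndromes.map pvTriple with hl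
  have hkeys : (l.foldl pvStep PySem.Dict.empty).keys
      = PySem.List.dedup (l.map (fun t => t.1)) := by
    rw [pvFold_keys]
    simp [PySem.Dict.keys_empty, PySem.Set.update_nil_left]
  have hnd : (l.foldl pvStep PySem.Dict.empty).keys.Nodup := by
    rw [hkeys]; exact PySem.List.nodup_dedup _
  rw [hfold, PySem.Dict.items_eq_map_keys _ hnd pvInit, hkeys]
  rw [List.map_map]
  apply List.map_congr_left
  intro k hk
  have := pvFold_getD l PySem.Dict.empty pvGood_empty k
  have hS0 : pvS PySem.Dict.empty k = [] := by
    simp [pvS, PySem.Dict.getD_empty, pvInit_eq, pvInner_getS]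
  have hC0 : pvC PySem.Dict.empty k = [] := by
    simp [pvC, PySem.Dict.getD_empty, pvInit_eq, pvInner_getC]
  simp only [Function.comp_apply, this, hS0, hC0, List.nil_append]
  rfl
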